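-- pv_equiv track=rewrite | github.com/MolecularAI/reaction_utils | rxnutils/chem/utils.py | split_smiles_from_reaction
-- ===== SOURCE A (Python) =====
-- from typing import List, Optional, Tuple
--
-- def split_smiles_from_reaction(smiles: str) -> List[str]:
--     """
--     Split a part of reaction SMILES, e.g. reactants or products
--     into components. Taking care of intra-molecular complexes
--
--     Taken from RDKit:
--     https://github.com/rdkit/rdkit/blob/master/Code/GraphMol/ChemReactions/DaylightParser.cpp
--
--     :param smiles: the SMILES/SMARTS
--     :return: the individual components.
--     """
--     pos = 0
--     block_start = 0
--     level = 0
--     in_block = 0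
--     components = []
--     while pos < len(smiles):
--         if smiles[pos] == "(":
--             if pos == block_start:
--                 in_block = 1
--             level += 1
--         elif smiles[pos] == ")":
--             if level == 1 and in_block:
--                 in_block = 2
--             level -= 1
--         elif level == 0 and smiles[pos] == ".":
--             if in_block == 2:
--                 components.append(smiles[block_start + 1 : pos - 1])
--             else:
--                 components.append(smiles[block_start:pos])
--             block_start = pos + 1
--             in_block = 0
--         pos += 1
--     if block_start < pos:
--         if in_block == 2:
--             components.append(smiles[block_start + 1 : pos - 1])
--         else:
--             components.append(smiles[block_start:pos])
--     return components
-- ===== SOURCE B (Python) =====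
-- def _unwrap(seg):
--     if not seg.startswith("("):
--         return seg
--     depth = 0
--     for ch in seg:
--         if ch == "(":
--             depth += 1
--         elif ch == ")":
--             if depth == 1:
--                 return seg[1:-1]
--             depth -= 1
--     return seg
--
--
-- def split_smiles_from_reaction(smiles):
--     # pass 1: split on dots at paren depth 0
--     segments = []
--     depth = 0
--     start = 0
--     for i, ch in enumerate(smiles):
--         if ch == "(":
--             depth += 1
--         elif ch == ")":
--             depth -= 1
--         elif ch == "." and depth == 0:
--             segments.append(smiles[start:i])
--             start = i + 1
--     if start < len(smiles):
--         segments.append(smiles[start:])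
--     # pass 2: unwrap intramolecular-complex parentheses
--     return [_unwrap(seg) for seg in segments]
-- ===== Notes on version B (the rewrite author's own statement) =====
-- stated objective: faster
-- what changed: A's single fused state machine (position/level/in_block/block_start) is split into two passes: first split on dots at paren depth 0 collecting raw segments, then each segment is independently rescanned to decide whether to strip the outer parentheses.
import Mathlib
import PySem

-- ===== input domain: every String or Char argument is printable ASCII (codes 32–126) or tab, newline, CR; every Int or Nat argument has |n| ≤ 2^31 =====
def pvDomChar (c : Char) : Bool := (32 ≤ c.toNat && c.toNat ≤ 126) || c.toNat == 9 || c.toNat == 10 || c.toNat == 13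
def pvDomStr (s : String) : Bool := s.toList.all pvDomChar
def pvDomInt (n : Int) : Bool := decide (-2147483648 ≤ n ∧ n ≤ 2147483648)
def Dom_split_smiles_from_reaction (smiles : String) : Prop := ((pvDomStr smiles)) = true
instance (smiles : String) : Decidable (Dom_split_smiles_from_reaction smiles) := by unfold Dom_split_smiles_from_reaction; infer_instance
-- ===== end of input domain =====

-- B restructures A's fused state machine into two passes (split on depth-0 dots, then per-segment unwrap); equivalence of the return values is proved on all inputs.

-- ===== PORT A =====
-- A's while loop over positions, state (pos, block_start, level, in_block, components); slices via PySem.List.slice.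
def pvALoop (s : List Char) (pos bs : Nat) (level : Int) (ib : Nat)
    (comps : List (List Char)) : List (List Char) :=
  if h : pos < s.length then
    if s[pos] = '(' then
      pvALoop s (pos + 1) bs (level + 1) (if pos = bs then 1 else ib) comps
    else if s[pos] = ')' then
      pvALoop s (pos + 1) bs (level - 1) (if level = 1 ∧ ib ≠ 0 then 2 else ib) comps
    else if level = 0 ∧ s[pos] = '.' then
      pvALoop s (pos + 1) (pos + 1) level 0
        (comps ++ [if ib = 2 then PySem.List.slice s (some ((bs : Int) + 1)) (some ((pos : Int) - 1))
                   else PySem.List.slice s (some (bs : Int)) (some (pos : Int))])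
    else
      pvALoop s (pos + 1) bs level ib comps
  else
    if bs < pos then
      comps ++ [if ib = 2 then PySem.List.slice s (some ((bs : Int) + 1)) (some ((pos : Int) - 1))
                else PySem.List.slice s (some (bs : Int)) (some (pos : Int))]
    else comps
termination_by s.length - pos

def split_smiles_from_reaction (smiles : String) : List String :=
  (pvALoop smiles.toList 0 0 0 0 []).map String.ofList

-- ===== PORT B =====
-- B's second pass: scan of one segment deciding whether to strip the outer parens (seg[1:-1]).
def pvUnwrapGo (orig : List Char) (rest : List Char) (depth : Int) : List Char :=
  match rest with
  | [] => orig
  | c :: r =>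
    if c = '(' then pvUnwrapGo orig r (depth + 1)
    else if c = ')' then
      if depth = 1 then (orig.drop 1).dropLast
      else pvUnwrapGo orig r (depth - 1)
    else pvUnwrapGo orig r depth

def pvUnwrap (seg : List Char) : List Char :=
  match seg with
  | [] => seg
  | c :: _ => if c = '(' then pvUnwrapGo seg seg 0 else seg

-- B's first pass: split on dots at paren depth 0.
def pvBSplit (s : List Char) (i start : Nat) (depth : Int)
    (acc : List (List Char)) : List (List Char) :=
  if h : i < s.length then
    if s[i] = '(' then pvBSplit s (i + 1) start (depth + 1) acc
    else if s[i] = ')' then pvBSplit s (i + 1) start (depth - 1) acc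
    else if s[i] = '.' ∧ depth = 0 then
      pvBSplit s (i + 1) (i + 1) depth (acc ++ [PySem.List.slice s (some (start : Int)) (some (i : Int))])
    else pvBSplit s (i + 1) start depth acc
  else
    if start < s.length then acc ++ [s.drop start] else acc
termination_by s.length - i

def split_smiles_from_reaction_alt (smiles : String) : List String :=
  ((pvBSplit smiles.toList 0 0 0 []).map pvUnwrap).map String.ofList

-- ===== PRECONDITION & SPEC =====
def Spec_split_smiles_from_reaction (smiles : String) (out : List String) : Prop := out = split_smiles_from_reaction_alt smiles
instance (smiles : String) (out : List String) : Decidable (Spec_split_smiles_from_reaction smiles out) := by unfold Spec_split_smiles_from_reaction; infer_instance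

-- ===== CLAIM (what is proved, stated in full; the proofs are below) =====
def Claim_equal_split_smiles_from_reaction : Prop := ∀ (smiles : String), Dom_split_smiles_from_reaction smiles → Spec_split_smiles_from_reaction smiles (split_smiles_from_reaction smiles)

-- ===== LEMMAS AND PROOFS =====

-- A's (level, in_block) state as a function of the current partial segment.
def pvIbStep (st : Int × Nat) (c : Char) : Int × Nat :=
  if c = '(' then (st.1 + 1, st.2)
  else if c = ')' then (st.1 - 1, if st.1 = 1 ∧ st.2 ≠ 0 then 2 else st.2)
  else st

def pvIbOf : List Char → Int × Nat
  | [] => (0, 0)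
  | c :: t => t.foldl pvIbStep
      (if c = '(' then (1, 1) else if c = ')' then (-1, 0) else (0, 0))

lemma pvIb_sticky2 (t : List Char) : ∀ l : Int, (t.foldl pvIbStep (l, 2)).2 = 2 := by
  induction t with
  | nil => intro l; rfl
  | cons c r ih =>
    intro l
    simp only [List.foldl_cons, pvIbStep]
    split_ifs <;> simp_all

lemma pvIb_sticky0 (t : List Char) : ∀ l : Int, (t.foldl pvIbStep (l, 0)).2 = 0 := by
  induction t with
  | nil => intro l; rfl
  | cons c r ih =>
    intro l
    simp only [List.foldl_cons, pvIbStep]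
    split_ifs <;> simp_all

lemma pvUnwrapGo_eq (orig : List Char) (t : List Char) : ∀ l : Int,
    pvUnwrapGo orig t l =
      (if (t.foldl pvIbStep (l, 1)).2 = 2 then (orig.drop 1).dropLast else orig) := by
  induction t with
  | nil => intro l; simp [pvUnwrapGo]
  | cons c r ih =>
    intro l
    simp only [pvUnwrapGo, List.foldl_cons, pvIbStep]
    by_cases hp : c = '('
    · simp [hp, ih]
    · by_cases hq : c = ')'
      · by_cases hl : l = 1
        · simp [hq, hl, pvIb_sticky2]
        · simp [hq, hl, ih]
      · simp [hp, hq, ih]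

-- pvUnwrap in terms of the segment's in_block value.
lemma pvUnwrap_eq (seg : List Char) :
    pvUnwrap seg = (if (pvIbOf seg).2 = 2 then (seg.drop 1).dropLast else seg) := by
  match seg with
  | [] => simp [pvUnwrap, pvIbOf]
  | c :: t =>
    by_cases hp : c = '('
    · subst hp
      simp only [pvUnwrap]
      have hstep : pvUnwrapGo ('(' :: t) ('(' :: t) 0 = pvUnwrapGo ('(' :: t) t 1 := by
        simp [pvUnwrapGo]
      rw [hstep, pvUnwrapGo_eq]
      simp [pvIbOf]
    · have h0 : (pvIbOf (c :: t)).2 = 0 := by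
        simp only [pvIbOf, if_neg hp]
        by_cases hq : c = ')'
        · simp [hq, pvIb_sticky0]
        · simp [hq, pvIb_sticky0]
      simp [pvUnwrap, hp, h0]

lemma pvIb2_len (seg : List Char) (h : (pvIbOf seg).2 = 2) : 2 ≤ seg.length := by
  match seg with
  | [] => simp [pvIbOf] at h
  | [c] =>
    exfalso
    simp only [pvIbOf, List.foldl_nil] at h
    split_ifs at h
    simp_all
  | a :: b :: t => simp [List.length]

-- appending one char to a NONEMPTY partial segment advances the state by pvIbStep
lemma pvIbOf_append (seg : List Char) (c : Char) (h : seg ≠ []) :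
    pvIbOf (seg ++ [c]) = pvIbStep (pvIbOf seg) c := by
  match seg with
  | d :: t => simp [pvIbOf, List.foldl_append]

lemma pvBSplit_acc (s : List Char) : ∀ i start depth acc,
    pvBSplit s i start depth acc = acc ++ pvBSplit s i start depth [] := by
  intro i
  induction hn : s.length - i using Nat.strong_induction_on generalizing i with
  | _ n ih =>
    intro start depth acc
    rw [pvBSplit]
    conv_rhs => rw [pvBSplit]
    by_cases h : i < s.length
    · simp only [dif_pos h]
      have hlt : s.length - (i + 1) < n := by omega
      split_ifs with h1 h2 h3
      · exact ih _ hlt _ rfl _ _ _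
      · exact ih _ hlt _ rfl _ _ _
      · rw [ih _ hlt _ rfl _ _ (acc ++ _), ih _ hlt _ rfl _ _ ([] ++ _)]
        simp
      · exact ih _ hlt _ rfl _ _ _
    · simp only [dif_neg h]
      split_ifs <;> simp

-- the segment accumulated so far
def pvSeg (s : List Char) (bs pos : Nat) : List Char := (s.drop bs).take (pos - bs)

lemma pvSeg_len (s : List Char) (bs pos : Nat) (hb : bs ≤ pos) (hp : pos ≤ s.length) :
    (pvSeg s bs pos).length = pos - bs := by
  unfold pvSeg
  simp only [List.length_take, List.length_drop]
  omega

lemma pvSeg_ne (s : List Char) (bs pos : Nat) (hb : bs < pos) (hp : pos ≤ s.length) :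
    pvSeg s bs pos ≠ [] := by
  intro hc
  have := congrArg List.length hc
  rw [pvSeg_len s bs pos (by omega) hp] at this
  simp at this
  omega

lemma pvSeg_snoc (s : List Char) (bs pos : Nat) (hb : bs ≤ pos) (hp : pos < s.length) :
    pvSeg s bs (pos + 1) = pvSeg s bs pos ++ [s[pos]] := by
  unfold pvSeg
  have h1 : pos + 1 - bs = (pos - bs) + 1 := by omega
  rw [h1, List.take_add_one]
  have h2 : (s.drop bs)[pos - bs]? = some s[pos] := by
    rw [List.getElem?_drop]
    rw [List.getElem?_eq_getElem (by omega)]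
    congr 2
    omega
  simp [h2]

lemma pvSlice_eq_seg (s : List Char) (bs pos : Nat) :
    PySem.List.slice s (some (bs : Int)) (some (pos : Int)) = pvSeg s bs pos := by
  rw [PySem.List.slice_natCast]; rfl

lemma pvSlice_strip (s : List Char) (bs pos : Nat) (hb : bs + 2 ≤ pos) (hp : pos ≤ s.length) :
    PySem.List.slice s (some ((bs : Int) + 1)) (some ((pos : Int) - 1)) =
      ((pvSeg s bs pos).drop 1).dropLast := by
  have h1 : ((bs : Int) + 1) = ((bs + 1 : Nat) : Int) := by push_cast; ring
  have h2 : ((pos : Int) - 1) = ((pos - 1 : Nat) : Int) := by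
    push_cast [Nat.cast_sub (by omega : 1 ≤ pos)]; ring
  rw [h1, h2, PySem.List.slice_natCast]
  unfold pvSeg
  rw [List.drop_take, List.drop_drop]
  have hlen : ((s.drop (bs + 1)).take (pos - bs - 1)).length = pos - bs - 1 := by
    simp only [List.length_take, List.length_drop]
    omega
  rw [List.dropLast_eq_take, hlen, List.take_take]
  congr 1
  omega

-- Main loop correspondence: A's fused loop equals B's split pass post-composed with unwrap.
lemma pvMain (s : List Char) : ∀ pos bs (level : Int) (ib : Nat) comps,
    bs ≤ pos → pos ≤ s.length → (level, ib) = pvIbOf (pvSeg s bs pos) →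
    pvALoop s pos bs level ib comps =
      comps ++ (pvBSplit s pos bs level []).map pvUnwrap := by
  intro pos
  induction hn : s.length - pos using Nat.strong_induction_on generalizing pos with
  | _ n ih =>
    intro bs level ib comps hbs hpos hinv
    rw [pvALoop, pvBSplit]
    by_cases h : pos < s.length
    · simp only [dif_pos h]
      have hlt : s.length - (pos + 1) < n := by omega
      have hsnoc := pvSeg_snoc s bs pos hbs h
      by_cases h1 : s[pos] = '('
      · rw [if_pos h1, if_pos h1]
        refine ih _ hlt _ rfl bs (level + 1) _ comps (by omega) (by omega) ?_
        rw [hsnoc, h1]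
        by_cases hstart : pos = bs
        · have hseg0 : pvSeg s bs pos = [] := by
            unfold pvSeg; simp [hstart]
          rw [hseg0] at hinv ⊢
          injection hinv with hl hib
          simp [hstart, pvIbOf, ← hl]
        · rw [pvIbOf_append _ _ (pvSeg_ne s bs pos (by omega) hpos), ← hinv]
          simp [pvIbStep, hstart]
      · by_cases h2 : s[pos] = ')'
        · rw [if_neg h1, if_neg h1, if_pos h2, if_pos h2]
          refine ih _ hlt _ rfl bs (level - 1) _ comps (by omega) (by omega) ?_
          rw [hsnoc, h2]
          by_cases hstart : pos = bs
          · have hseg0 : pvSeg s bs pos = [] := by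
              unfold pvSeg; simp [hstart]
            rw [hseg0] at hinv ⊢
            injection hinv with hl hib
            simp [pvIbOf, ← hl, ← hib]
          · rw [pvIbOf_append _ _ (pvSeg_ne s bs pos (by omega) hpos), ← hinv]
            simp [pvIbStep]
        · have hemit : (if ib = 2 then PySem.List.slice s (some ((bs : Int) + 1)) (some ((pos : Int) - 1))
                        else PySem.List.slice s (some (bs : Int)) (some (pos : Int)))
              = pvUnwrap (PySem.List.slice s (some (bs : Int)) (some (pos : Int))) := by
            rw [pvSlice_eq_seg, pvUnwrap_eq]
            have hib : (pvIbOf (pvSeg s bs pos)).2 = ib := by rw [← hinv]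
            rw [hib]
            by_cases hi2 : ib = 2
            · rw [if_pos hi2, if_pos hi2]
              have hlen2 : 2 ≤ (pvSeg s bs pos).length :=
                pvIb2_len _ (by rw [hib]; exact hi2)
              rw [pvSeg_len s bs pos hbs hpos] at hlen2
              exact pvSlice_strip s bs pos (by omega) hpos
            · rw [if_neg hi2, if_neg hi2]
          by_cases h3 : level = 0 ∧ s[pos] = '.'
          · rw [if_neg h1, if_neg h1, if_neg h2, if_neg h2, if_pos h3,
              if_pos (And.intro h3.2 h3.1)]
            rw [ih _ hlt _ rfl (pos + 1) level 0 _ (le_refl _) (by omega) ?_]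
            · simp only [List.nil_append]
              rw [pvBSplit_acc s (pos + 1) (pos + 1) level
                [PySem.List.slice s (some (bs : Int)) (some (pos : Int))]]
              simp [hemit]
            · unfold pvSeg
              simp only [Nat.sub_self, List.take_zero, pvIbOf]
              rw [h3.1]
          · have h3' : ¬ (s[pos] = '.' ∧ level = 0) := fun hc => h3 ⟨hc.2, hc.1⟩
            rw [if_neg h1, if_neg h1, if_neg h2, if_neg h2, if_neg h3, if_neg h3']
            refine ih _ hlt _ rfl bs level ib comps (by omega) (by omega) ?_
            rw [hsnoc]
            by_cases hstart : pos = bs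
            · have hseg0 : pvSeg s bs pos = [] := by
                unfold pvSeg; simp [hstart]
              rw [hseg0] at hinv ⊢
              injection hinv with hl hib
              simp [pvIbOf, h1, h2, ← hl, ← hib]
            · rw [pvIbOf_append _ _ (pvSeg_ne s bs pos (by omega) hpos), ← hinv]
              simp [pvIbStep, h1, h2]
    · simp only [dif_neg h]
      have hpl : pos = s.length := by omega
      by_cases hb : bs < pos
      · rw [if_pos hb, if_pos (by omega : bs < s.length)]
        simp only [List.nil_append, List.map_cons, List.map_nil]
        congr 1
        congr 1
        have hseg : s.drop bs = pvSeg s bs pos := by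
          unfold pvSeg
          rw [List.take_of_length_le]
          simp only [List.length_drop]
          omega
        rw [hseg, pvUnwrap_eq]
        have hib : (pvIbOf (pvSeg s bs pos)).2 = ib := by rw [← hinv]
        rw [hib]
        by_cases hi2 : ib = 2
        · rw [if_pos hi2, if_pos hi2]
          have hlen2 : 2 ≤ (pvSeg s bs pos).length :=
            pvIb2_len _ (by rw [hib]; exact hi2)
          rw [pvSeg_len s bs pos hbs hpos] at hlen2
          exact pvSlice_strip s bs pos (by omega) hpos
        · rw [if_neg hi2, if_neg hi2, pvSlice_eq_seg]
      · rw [if_neg hb, if_neg (by omega : ¬ bs < s.length)]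
        simp

-- ===== VERDICT (by name: the statement is the Claim_ definition above) =====
theorem split_smiles_from_reaction_spec : Claim_equal_split_smiles_from_reaction := by
  intro smiles _
  unfold Spec_split_smiles_from_reaction split_smiles_from_reaction split_smiles_from_reaction_alt
  rw [pvMain smiles.toList 0 0 0 0 [] (le_refl 0) (by omega) (by simp [pvSeg, pvIbOf])]
  simp
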